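-- pv_equiv track=rewrite | github.com/MegaGiciorPortas/WDI-Zadania | 01-zmienne/1.58.py | funkcja
-- ===== SOURCE A (Python) =====
-- from math import log2, ceil, isqrt
--
-- def czy_pierwsza(n):
--     if n <= 1:
--         return False
--     if n <= 3:
--         return True
--     if n % 2 == 0 or n % 3 == 0:
--         return False
--     i = 5
--     while i * i <= n:
--         if n % i == 0:
--             return False
--         i += 2
--         if n % i == 0:
--             return False
--         i += 4
--     return True
--
-- def zamiana_na_podstawe(n, p):
--     if n == 0:
--         return "0"
--     N = ceil(log2(n)) + 1
--     tablica = [0 for _ in range(N)]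
--     indeks = 0
--     while n > 0:
--         tablica[indeks] = n % p
--         n = n // p
--         indeks += 1
--
--     wynik = ""
--     for i in range(indeks - 1, -1, -1):
--         if tablica[i] >= 10:
--             wynik += chr((tablica[i] % 10) + 65)
--         else:
--             wynik += str(tablica[i])
--
--     return wynik
--
-- def iloczyn_liczby(n):
--     wynik = 1
--     for a in n:
--         if 48 <= ord(a) <= 57:
--             wynik *= int(a)
--         else:
--             wynik *= int(ord(a) - 55)
--     return wynik
--
-- def funkcja(n):
--     aktualna_rotacja = n
--     for i in range(2, 17):
--         for j in range(len(n)):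
--             if czy_pierwsza(iloczyn_liczby(zamiana_na_podstawe(int(aktualna_rotacja),i))):
--                 return i
--             aktualna_rotacja = aktualna_rotacja[len(aktualna_rotacja) - 1] + aktualna_rotacja[
--                 0:len(aktualna_rotacja) - 1]
--     return None
-- ===== SOURCE B (Python) =====
-- def czy_pierwsza(n):
--     if n <= 1:
--         return False
--     if n <= 3:
--         return True
--     if n % 2 == 0 or n % 3 == 0:
--         return False
--     i = 5
--     while i * i <= n:
--         if n % i == 0:
--             return False
--         i += 2
--         if n % i == 0:
--             return False
--         i += 4
--     return True
--
--
-- def iloczyn_cyfr(m, p):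
--     # base-p digit product of m, computed arithmetically (no base string)
--     w = 1
--     while m > 0:
--         w *= m % p
--         m //= p
--     return w
--
--
-- def funkcja(n):
--     # the len(n) rotations repeat cyclically, so parse each of them once up front
--     rotacje = []
--     aktualna = n
--     for _ in range(len(n)):
--         rotacje.append(int(aktualna))
--         aktualna = aktualna[-1] + aktualna[:-1]
--     for i in range(2, 17):
--         if any(czy_pierwsza(iloczyn_cyfr(m, i)) for m in rotacje):
--             return i
--     return None
-- ===== Notes on version B (the rewrite author's own statement) =====
-- stated objective: simpler
-- what changed: B computes the base-i digit product arithmetically (product of m % i while dividing) instead of A's encode-to-base-string / chr-ord decode round-trip, and parses the len(n) cyclic rotations once up front, testing each base with any() over those precomputed ints.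
import Mathlib
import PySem

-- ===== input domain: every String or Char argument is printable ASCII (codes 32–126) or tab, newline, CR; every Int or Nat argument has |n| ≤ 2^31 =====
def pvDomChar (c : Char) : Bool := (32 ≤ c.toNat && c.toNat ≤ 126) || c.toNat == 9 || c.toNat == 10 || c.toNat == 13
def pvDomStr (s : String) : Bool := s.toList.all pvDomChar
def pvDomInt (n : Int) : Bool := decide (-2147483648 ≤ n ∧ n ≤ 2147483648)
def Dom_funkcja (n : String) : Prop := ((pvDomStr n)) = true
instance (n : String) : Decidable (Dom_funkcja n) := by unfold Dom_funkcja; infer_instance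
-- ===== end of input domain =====

-- B replaces the base-string round-trip (encode to a base-i string, decode each char, multiply)
-- by a direct arithmetic digit product, and parses the len(n) rotations once up front.

-- ===== PORT A =====

-- shared helper: czy_pierwsza is textually identical in A and in B, so both ports use this one
-- definition.  The while loop gets fuel n.toNat+1, which the loop (i grows by 6 from 5 while
-- i*i ≤ n) never exhausts.
def czyLoop (n : Int) : Nat → Int → Bool
  | 0, _ => true
  | f + 1, i =>
      if i * i ≤ n then
        if PySem.Int.mod n i = 0 then false
        else if PySem.Int.mod n (i + 2) = 0 then false
        else czyLoop n f (i + 6)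
      else true

def czy_pierwsza (n : Int) : Bool :=
  if n ≤ 1 then false
  else if n ≤ 3 then true
  else if PySem.Int.mod n 2 = 0 ∨ PySem.Int.mod n 3 = 0 then false
  else czyLoop n (n.toNat + 1) 5

-- the while loop of zamiana_na_podstawe: tablica[indeks] = n % p; n //= p; indeks += 1.
-- Fuel n.toNat+1 is never exhausted (n strictly decreases while n > 0, p ≥ 2 at every call site).
def zamianaLoop (p : Int) : Nat → Int → List Int → Nat → List Int × Nat
  | 0, _, tab, idx => (tab, idx)
  | f + 1, n, tab, idx =>
      if 0 < n then zamianaLoop p f (PySem.Int.floordiv n p) (tab.set idx (PySem.Int.mod n p)) (idx + 1)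
      else (tab, idx)

-- body of the wynik loop: chr((d % 10) + 65) for d ≥ 10, str(d) otherwise
def encodeDigit (d : Int) : List Char :=
  if 10 ≤ d then [Char.ofNat ((PySem.Int.mod d 10).toNat + 65)]
  else PySem.Int.toChars d

def zamiana_na_podstawe (n p : Int) : List Char :=
  if n = 0 then ['0']
  else
    -- N = ceil(log2(n)) + 1 : Nat.clog 2 is the exact value of the float expression here; any
    -- float-rounding discrepancy only pads the zero array, whose cells beyond indeks are never read.
    let N := Nat.clog 2 n.toNat + 1
    let r := zamianaLoop p (n.toNat + 1) n (List.replicate N 0) 0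
    (PySem.List.pyRange ((r.2 : Int) - 1) (-1) (-1)).foldl
      (fun w i => w ++ encodeDigit (PySem.List.pyGetD r.1 i 0)) []

-- int(a) on the branch 48 ≤ ord(a) ≤ 57 is exactly ord(a) - 48 (a is a single decimal digit)
def iloczyn_liczby (cs : List Char) : Int :=
  cs.foldl (fun w a =>
    if 48 ≤ a.toNat ∧ a.toNat ≤ 57 then w * ((a.toNat : Int) - 48)
    else w * ((a.toNat : Int) - 55)) 1

-- aktualna[len(aktualna)-1] + aktualna[0:len(aktualna)-1] (index in range: the loop body only
-- runs for a nonempty string, so the pyGetD default is never used)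
def rotA (cs : List Char) : List Char :=
  PySem.List.pyGetD cs ((cs.length : Int) - 1) ' ' ::
    PySem.List.slice cs (some 0) (some ((cs.length : Int) - 1))

-- inner 'for j in range(len(n))' loop; .inl r = early return with r, .inr rot = loop finished.
-- int(...) raising ValueError, and math.log2 of a negative int raising ValueError inside
-- zamiana_na_podstawe, are modelled as .inl none; Pre_funkcja excludes both.
def innerA (i : Int) : Nat → List Char → Option Int ⊕ List Char
  | 0, rot => .inr rot
  | j + 1, rot =>
      match PySem.Int.ofChars? rot with
      | none => .inl none
      | some m =>
          if 0 ≤ m then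
            if czy_pierwsza (iloczyn_liczby (zamiana_na_podstawe m i)) then .inl (some i)
            else innerA i j (rotA rot)
          else .inl none

-- outer 'for i in range(2, 17)' loop; the rotation state persists across bases
def outerA (len : Nat) : List Int → List Char → Option Int
  | [], _ => none
  | i :: rest, rot =>
      match innerA i len rot with
      | .inl r => r
      | .inr rot' => outerA len rest rot'

def funkcja (n : String) : Option Int :=
  outerA n.toList.length (PySem.List.pyRange 2 17 1) n.toList

-- ===== PORT B =====

-- while m > 0: w *= m % p; m //= p  (fuel m.toNat+1 is never exhausted: m strictly decreases,
-- p ≥ 2 at every call site)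
def iloczynCyfrLoop (p : Int) : Nat → Int → Int → Int
  | 0, _, w => w
  | f + 1, m, w =>
      if 0 < m then iloczynCyfrLoop p f (PySem.Int.floordiv m p) (w * PySem.Int.mod m p)
      else w

def iloczyn_cyfr (m p : Int) : Int := iloczynCyfrLoop p (m.toNat + 1) m 1

-- aktualna[-1] + aktualna[:-1]
def rotB (cs : List Char) : List Char :=
  PySem.List.pyGetD cs (-1) ' ' :: PySem.List.slice cs none (some (-1))

-- the rotation-parsing loop of B; none models int(...) raising ValueError (excluded by Pre_funkcja)
def buildRots : Nat → List Char → Option (List Int)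
  | 0, _ => some []
  | k + 1, cur =>
      match PySem.Int.ofChars? cur with
      | none => none
      | some m => (buildRots k (rotB cur)).map (m :: ·)

def findBase (rots : List Int) : List Int → Option Int
  | [] => none
  | i :: rest =>
      if rots.any (fun m => czy_pierwsza (iloczyn_cyfr m i)) then some i
      else findBase rots rest

def funkcja_alt (n : String) : Option Int :=
  match buildRots n.toList.length n.toList with
  | none => none
  | some rots => findBase rots (PySem.List.pyRange 2 17 1)

-- ===== PRECONDITION & SPEC =====
-- Pre_: every cyclic rotation of n parses as a nonnegative int — exactly the inputs on which A
-- returns: on any other input some int(rotation) raises ValueError, or math.log2 of a negative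
-- value raises, before A can return (base 2 digit products are 0 or 1, never prime).
def Pre_funkcja (n : String) : Prop :=
  ∀ k : Nat, k < n.toList.length → 0 ≤ (PySem.Int.ofChars? (n.toList.rotate k)).getD (-1)
instance (n : String) : Decidable (Pre_funkcja n) := by unfold Pre_funkcja; infer_instance

def pvWitness_funkcja : String := "13"

def Spec_funkcja (n : String) (out : Option Int) : Prop := out = funkcja_alt n
instance (n : String) (out : Option Int) : Decidable (Spec_funkcja n out) := by unfold Spec_funkcja; infer_instance

-- ===== CLAIM (what is proved, stated in full; the proofs are below) =====
def Claim_equal_funkcja : Prop := ∀ (n : String), Dom_funkcja n → Pre_funkcja n → Spec_funkcja n (funkcja n)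

-- ===== LEMMAS AND PROOFS =====

-- little-endian digit stream shared by both loops
def dig (p : Int) : Nat → Int → List Int
  | 0, _ => []
  | f + 1, m => if 0 < m then PySem.Int.mod m p :: dig p f (PySem.Int.floordiv m p) else []

-- sequential writes of zamianaLoop
def setSeq : List Int → Nat → List Int → List Int
  | tab, _, [] => tab
  | tab, idx, d :: ds => setSeq (tab.set idx d) (idx + 1) ds

lemma iloczynCyfrLoop_eq (p : Int) :
    ∀ (f : Nat) (m w : Int), iloczynCyfrLoop p f m w = w * (dig p f m).prod := by
  intro f
  induction f with
  | zero => intro m w; simp [iloczynCyfrLoop, dig]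
  | succ f ih =>
      intro m w
      simp only [iloczynCyfrLoop, dig]
      split_ifs with h
      · rw [ih]; simp [mul_assoc]
      · simp

lemma zamianaLoop_eq (p : Int) :
    ∀ (f : Nat) (n : Int) (tab : List Int) (idx : Nat),
      zamianaLoop p f n tab idx = (setSeq tab idx (dig p f n), idx + (dig p f n).length) := by
  intro f
  induction f with
  | zero => intro n tab idx; simp [zamianaLoop, dig, setSeq]
  | succ f ih =>
      intro n tab idx
      simp only [zamianaLoop, dig]
      split_ifs with h
      · rw [ih]; exact Prod.ext rfl (by simp; omega)
      · simp [setSeq]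

lemma setSeq_eq : ∀ (ds tab : List Int) (idx : Nat), idx + ds.length ≤ tab.length →
    setSeq tab idx ds = tab.take idx ++ ds ++ tab.drop (idx + ds.length) := by
  have key : ∀ (ds pre suf : List Int), ds.length ≤ suf.length →
      setSeq (pre ++ suf) pre.length ds = pre ++ ds ++ suf.drop ds.length := by
    intro ds
    induction ds with
    | nil => intro pre suf _; simp [setSeq]
    | cons d ds ih =>
        intro pre suf hlen
        cases suf with
        | nil => simp at hlen
        | cons s0 suf' =>
            simp only [setSeq]
            rw [List.set_append_right _ _ (le_refl _), Nat.sub_self]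
            have h1 : pre ++ (s0 :: suf').set 0 d = (pre ++ [d]) ++ suf' := by simp
            have h2 : pre.length + 1 = (pre ++ [d]).length := by simp
            rw [h1, h2, ih (pre ++ [d]) suf' (by simpa using hlen)]
            simp
  intro ds tab idx h
  have hsplit : tab = tab.take idx ++ tab.drop idx := (List.take_append_drop idx tab).symm
  have hidx : idx = (tab.take idx).length := by
    simp [List.length_take]; omega
  have hlen2 : ds.length ≤ (tab.drop idx).length := by
    simp [List.length_drop]; omega
  calc setSeq tab idx ds = setSeq (tab.take idx ++ tab.drop idx) (tab.take idx).length ds := by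
        rw [← hsplit, ← hidx]
    _ = tab.take idx ++ ds ++ (tab.drop idx).drop ds.length := key ds _ _ hlen2
    _ = tab.take idx ++ ds ++ tab.drop (idx + ds.length) := by rw [List.drop_drop, Nat.add_comm]

lemma dig_eq_digits (p : Int) (hp : 2 ≤ p) :
    ∀ (f : Nat) (m : Int), 0 ≤ m → m.toNat < f →
      dig p f m = List.map Int.ofNat (Nat.digits p.toNat m.toNat) := by
  intro f
  induction f with
  | zero => intro m _ h; omega
  | succ f ih =>
      intro m hm hf
      have hp1 : 1 < p.toNat := by omega
      by_cases h0 : 0 < m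
      · have hmn : (0 : Nat) < m.toNat := by omega
        have hme : ((m.toNat : Int)) = m := Int.toNat_of_nonneg hm
        have hpe : ((p.toNat : Int)) = p := Int.toNat_of_nonneg (by omega)
        have hmod : PySem.Int.mod m p = ((m.toNat % p.toNat : Nat) : Int) := by
          conv_lhs => rw [← hme, ← hpe]
          exact PySem.Int.mod_natCast _ _
        have hdiv : PySem.Int.floordiv m p = ((m.toNat / p.toNat : Nat) : Int) := by
          conv_lhs => rw [← hme, ← hpe]
          exact PySem.Int.floordiv_natCast _ _
        have hrec := ih ((m.toNat / p.toNat : Nat) : Int) (by positivity)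
          (by simp only [Int.toNat_natCast]
              have := Nat.div_lt_self hmn hp1; omega)
        simp only [dig, if_pos h0, hmod, hdiv]
        rw [hrec]
        simp only [Int.toNat_natCast]
        rw [Nat.digits_def' hp1 hmn]
        simp
      · have : m = 0 := by omega
        subst this
        simp [dig]

lemma dig_bounds (p : Int) (hp : 2 ≤ p) :
    ∀ (f : Nat) (m d : Int), d ∈ dig p f m → 0 ≤ d ∧ d < p := by
  intro f
  induction f with
  | zero => intro m d h; simp [dig] at h
  | succ f ih =>
      intro m d h
      simp only [dig] at h
      split_ifs at h with h0
      · rcases List.mem_cons.mp h with h | h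
        · subst h
          exact ⟨PySem.Int.mod_nonneg _ (by omega), PySem.Int.mod_lt _ (by omega)⟩
        · exact ih _ _ h
      · simp at h

-- per-digit decode of encodeDigit under the iloczyn_liczby fold
lemma iloczyn_encode (d : Int) (h0 : 0 ≤ d) (h16 : d < 16) (w : Int) :
    (encodeDigit d).foldl (fun w a =>
      if 48 ≤ a.toNat ∧ a.toNat ≤ 57 then w * ((a.toNat : Int) - 48)
      else w * ((a.toNat : Int) - 55)) w = w * d := by
  interval_cases d <;>
    first
      | (rw [show encodeDigit 0 = ['0'] from by decide, List.foldl_cons, List.foldl_nil, if_pos (by decide)]; congr 1)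
      | (rw [show encodeDigit 1 = ['1'] from by decide, List.foldl_cons, List.foldl_nil, if_pos (by decide)]; congr 1)
      | (rw [show encodeDigit 2 = ['2'] from by decide, List.foldl_cons, List.foldl_nil, if_pos (by decide)]; congr 1)
      | (rw [show encodeDigit 3 = ['3'] from by decide, List.foldl_cons, List.foldl_nil, if_pos (by decide)]; congr 1)
      | (rw [show encodeDigit 4 = ['4'] from by decide, List.foldl_cons, List.foldl_nil, if_pos (by decide)]; congr 1)
      | (rw [show encodeDigit 5 = ['5'] from by decide, List.foldl_cons, List.foldl_nil, if_pos (by decide)]; congr 1)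
      | (rw [show encodeDigit 6 = ['6'] from by decide, List.foldl_cons, List.foldl_nil, if_pos (by decide)]; congr 1)
      | (rw [show encodeDigit 7 = ['7'] from by decide, List.foldl_cons, List.foldl_nil, if_pos (by decide)]; congr 1)
      | (rw [show encodeDigit 8 = ['8'] from by decide, List.foldl_cons, List.foldl_nil, if_pos (by decide)]; congr 1)
      | (rw [show encodeDigit 9 = ['9'] from by decide, List.foldl_cons, List.foldl_nil, if_pos (by decide)]; congr 1)
      | (rw [show encodeDigit 10 = ['A'] from by decide, List.foldl_cons, List.foldl_nil, if_neg (by decide)]; congr 1)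
      | (rw [show encodeDigit 11 = ['B'] from by decide, List.foldl_cons, List.foldl_nil, if_neg (by decide)]; congr 1)
      | (rw [show encodeDigit 12 = ['C'] from by decide, List.foldl_cons, List.foldl_nil, if_neg (by decide)]; congr 1)
      | (rw [show encodeDigit 13 = ['D'] from by decide, List.foldl_cons, List.foldl_nil, if_neg (by decide)]; congr 1)
      | (rw [show encodeDigit 14 = ['E'] from by decide, List.foldl_cons, List.foldl_nil, if_neg (by decide)]; congr 1)
      | (rw [show encodeDigit 15 = ['F'] from by decide, List.foldl_cons, List.foldl_nil, if_neg (by decide)]; congr 1)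

lemma iloczyn_flatMap (ds : List Int) (hb : ∀ d ∈ ds, 0 ≤ d ∧ d < 16) :
    ∀ w : Int, (ds.flatMap encodeDigit).foldl (fun w a =>
      if 48 ≤ a.toNat ∧ a.toNat ≤ 57 then w * ((a.toNat : Int) - 48)
      else w * ((a.toNat : Int) - 55)) w = w * ds.prod := by
  induction ds with
  | nil => intro w; simp
  | cons d ds ih =>
      intro w
      obtain ⟨h0, h16⟩ := hb d (List.mem_cons_self)
      rw [List.flatMap_cons, List.foldl_append, iloczyn_encode d h0 h16 w,
        ih (fun d hd => hb d (List.mem_cons_of_mem _ hd)), List.prod_cons]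
      ring

-- zamiana_na_podstawe, for m > 0, is the reversed digit list rendered through encodeDigit
lemma zamiana_pos (m i : Int) (h2 : 2 ≤ i) (hm : 0 < m) :
    zamiana_na_podstawe m i = (dig i (m.toNat + 1) m).reverse.flatMap encodeDigit := by
  set ds := dig i (m.toNat + 1) m with hds
  have hdigits : ds = List.map Int.ofNat (Nat.digits i.toNat m.toNat) :=
    dig_eq_digits i h2 _ m (le_of_lt hm) (by omega)
  set N := Nat.clog 2 m.toNat + 1 with hN
  have hLN : ds.length ≤ N := by
    rw [hdigits, List.length_map, Nat.digits_len _ _ (by omega) (by omega), hN]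

    have t1 : Nat.log i.toNat m.toNat ≤ Nat.log 2 m.toNat := Nat.log_anti_left (by omega) (by omega)
    have t2 := Nat.log_le_clog 2 m.toNat
    omega
  have hset : setSeq (List.replicate N (0 : Int)) 0 ds = ds ++ List.replicate (N - ds.length) 0 := by
    rw [setSeq_eq ds _ 0 (by simp; omega)]
    simp [List.drop_replicate]
  unfold zamiana_na_podstawe
  rw [if_neg (by omega)]
  simp only [← hN, zamianaLoop_eq, ← hds, hset, Nat.zero_add]
  rw [PySem.List.pyRange_neg_one]
  rw [show ((ds.length : Int) - 1 - -1).toNat = ds.length from by omega]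
  rw [List.foldl_map, PySem.List.foldl_append_eq_flatMap]
  have hmapeq : (List.range ds.length).map
      (fun (k : Nat) => PySem.List.pyGetD (ds ++ List.replicate (N - ds.length) 0) ((ds.length : Int) - 1 - (k : Int)) 0)
      = ds.reverse := by
    apply List.ext_getElem
    · simp
    · intro k h1 h2'
      have hk : k < ds.length := by simpa using h1
      rw [List.getElem_map, List.getElem_range]
      rw [show ((ds.length : Int) - 1 - (k : Int)) = ((ds.length - 1 - k : Nat) : Int) from by omega]
      rw [PySem.List.pyGetD_natCast]
      rw [List.getD_eq_getElem _ _ (by simp; omega)]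
      rw [List.getElem_append_left (by omega)]
      rw [List.getElem_reverse]
  rw [← hmapeq, List.flatMap_map]
  simp

-- the central pointwise lemma: A's string round-trip product = B's arithmetic product
lemma kluczowa (i m : Int) (h2 : 2 ≤ i) (h16 : i ≤ 16) (hm : 0 ≤ m) :
    czy_pierwsza (iloczyn_liczby (zamiana_na_podstawe m i)) = czy_pierwsza (iloczyn_cyfr m i) := by
  rcases eq_or_lt_of_le hm with h0 | h0
  · -- m = 0 : the string path gives digit product 0, the arithmetic path the empty product 1;
    -- neither is prime
    rw [← h0]
    rw [show zamiana_na_podstawe 0 i = ['0'] from by simp [zamiana_na_podstawe]]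
    rw [show iloczyn_liczby ['0'] = 0 from by decide]
    rw [show iloczyn_cyfr 0 i = 1 from by simp [iloczyn_cyfr, iloczynCyfrLoop]]
    decide
  · congr 1
    have hbound : ∀ d ∈ dig i (m.toNat + 1) m, 0 ≤ d ∧ d < 16 := by
      intro d hd
      obtain ⟨a, b⟩ := dig_bounds i h2 _ _ _ hd
      exact ⟨a, lt_of_lt_of_le b h16⟩
    rw [zamiana_pos m i h2 h0]
    unfold iloczyn_liczby
    rw [iloczyn_flatMap _ (fun d hd => hbound d (List.mem_reverse.mp hd)) 1]
    rw [one_mul, List.prod_reverse]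
    rw [iloczyn_cyfr, iloczynCyfrLoop_eq, one_mul]

-- rotations
lemma rotA_eq_cons (cs : List Char) (h : cs ≠ []) : rotA cs = cs.getLast h :: cs.dropLast := by
  have hlen : 0 < cs.length := List.length_pos_iff.mpr h
  unfold rotA
  rw [show ((cs.length : Int) - 1) = ((cs.length - 1 : Nat) : Int) from by omega]
  rw [PySem.List.pyGetD_natCast, PySem.List.slice_zero_start,
    PySem.List.slice_to _ (by positivity)]
  rw [Int.toNat_natCast]
  rw [List.getD_eq_getElem _ _ (by omega), ← List.getLast_eq_getElem h, ← List.dropLast_eq_take]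

lemma rotB_eq_cons (cs : List Char) (h : cs ≠ []) : rotB cs = cs.getLast h :: cs.dropLast := by
  unfold rotB
  rw [PySem.List.pyGetD_neg_one _ _ h, PySem.List.slice_to_neg_one]

lemma rotA_eq_rotate (cs : List Char) (h : cs ≠ []) : rotA cs = cs.rotate (cs.length - 1) := by
  rw [rotA_eq_cons cs h, List.rotate_eq_drop_append_take (by omega),
    List.drop_length_sub_one h, ← List.dropLast_eq_take]
  rfl

lemma rotB_eq_rotA (cs : List Char) (h : cs ≠ []) : rotB cs = rotA cs := by
  rw [rotB_eq_cons cs h, rotA_eq_cons cs h]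

def Good (cs : List Char) : Prop :=
  ∀ k : Nat, k < cs.length → 0 ≤ (PySem.Int.ofChars? (cs.rotate k)).getD (-1)

lemma length_rotA (cs : List Char) (h : cs ≠ []) : (rotA cs).length = cs.length := by
  rw [rotA_eq_rotate cs h, List.length_rotate]

lemma good_rotA {cs : List Char} (h : cs ≠ []) (hg : Good cs) : Good (rotA cs) := by
  intro k hk
  have hlen : 0 < cs.length := List.length_pos_iff.mpr h
  rw [rotA_eq_rotate cs h, List.rotate_rotate, ← List.rotate_mod]
  exact hg _ (Nat.mod_lt _ hlen)

lemma rotA_iterate (cs : List Char) (h : cs ≠ []) :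
    ∀ j : Nat, rotA^[j] cs = cs.rotate (j * (cs.length - 1)) := by
  intro j
  induction j with
  | zero => simp
  | succ j ih =>
      rw [Function.iterate_succ_apply', ih]
      have hne : cs.rotate (j * (cs.length - 1)) ≠ [] := by
        apply List.ne_nil_of_length_pos
        rw [List.length_rotate]
        exact List.length_pos_iff.mpr h
      rw [rotA_eq_rotate _ hne, List.length_rotate, List.rotate_rotate]
      congr 1
      ring

lemma rotA_iterate_length (cs : List Char) (h : cs ≠ []) : rotA^[cs.length] cs = cs := by
  rw [rotA_iterate cs h cs.length, ← List.rotate_mod, Nat.mul_mod_right, List.rotate_zero]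

-- proof-side value list of the first j rotations
def rotVals : Nat → List Char → List Int
  | 0, _ => []
  | j + 1, cur => (PySem.Int.ofChars? cur).getD 0 :: rotVals j (rotA cur)

lemma good_head {cs : List Char} (h : cs ≠ []) (hg : Good cs) :
    ∃ v, PySem.Int.ofChars? cs = some v ∧ 0 ≤ v := by
  have h0 := hg 0 (List.length_pos_iff.mpr h)
  rw [List.rotate_zero] at h0
  cases hc : PySem.Int.ofChars? cs with
  | none => rw [hc] at h0; simp at h0
  | some v => exact ⟨v, rfl, by rw [hc] at h0; simpa using h0⟩

lemma buildRots_eq (j : Nat) (cur : List Char) (h : cur ≠ []) (hg : Good cur) :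
    buildRots j cur = some (rotVals j cur) := by
  induction j generalizing cur with
  | zero => simp [buildRots, rotVals]
  | succ j ih =>
      obtain ⟨v, hv, _⟩ := good_head h hg
      have hne' : rotA cur ≠ [] := by
        apply List.ne_nil_of_length_pos
        rw [length_rotA cur h]
        exact List.length_pos_iff.mpr h
      simp only [buildRots, rotVals, hv]
      rw [rotB_eq_rotA cur h, ih (rotA cur) hne' (good_rotA h hg)]
      rfl

lemma innerA_eq (i : Int) (h2 : 2 ≤ i) (h16 : i ≤ 16) :
    ∀ (j : Nat) (cur : List Char), cur ≠ [] → Good cur →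
      innerA i j cur =
        if (rotVals j cur).any (fun m => czy_pierwsza (iloczyn_cyfr m i)) then .inl (some i)
        else .inr (rotA^[j] cur) := by
  intro j
  induction j with
  | zero => intro cur _ _; simp [innerA, rotVals]
  | succ j ih =>
      intro cur hne hg
      obtain ⟨v, hv, hnn⟩ := good_head hne hg
      have hne' : rotA cur ≠ [] := by
        apply List.ne_nil_of_length_pos
        rw [length_rotA cur hne]
        exact List.length_pos_iff.mpr hne
      simp only [innerA, rotVals, hv]
      simp only [if_pos hnn]
      rw [kluczowa i v h2 h16 hnn]
      by_cases hp : czy_pierwsza (iloczyn_cyfr v i)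
      · simp [hp]
      · rw [if_neg hp, ih (rotA cur) hne' (good_rotA hne hg)]
        simp [hp, Function.iterate_succ_apply]

lemma outerA_eq (ns : List Char) (h : ns ≠ []) (hg : Good ns) :
    ∀ bases : List Int, (∀ i ∈ bases, 2 ≤ i ∧ i ≤ 16) →
      outerA ns.length bases ns = findBase (rotVals ns.length ns) bases := by
  intro bases
  induction bases with
  | nil => intro _; simp [outerA, findBase]
  | cons i rest ih =>
      intro hb
      obtain ⟨hi2, hi16⟩ := hb i List.mem_cons_self
      have hrest := fun x hx => hb x (List.mem_cons_of_mem _ hx)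
      simp only [outerA, findBase]
      rw [innerA_eq i hi2 hi16 ns.length ns h hg]
      by_cases hany : (rotVals ns.length ns).any (fun m => czy_pierwsza (iloczyn_cyfr m i)) = true
      · simp only [if_pos hany]
      · simp only [if_neg hany]
        rw [rotA_iterate_length ns h]
        exact ih hrest

lemma outerA_zero : ∀ (l : List Int) (rot : List Char), outerA 0 l rot = none := by
  intro l
  induction l with
  | nil => intro rot; rfl
  | cons i rest ih => intro rot; simpa only [outerA, innerA] using ih rot

-- ===== VERDICT (by name: the statement is the Claim_ definition above) =====
theorem funkcja_spec : Claim_equal_funkcja := by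
  intro n _ hpre
  unfold Spec_funkcja funkcja funkcja_alt
  by_cases hns : n.toList = []
  · rw [hns]
    simp only [List.length_nil]
    rw [outerA_zero]
    rfl
  · have hg : Good n.toList := hpre
    have hbases : ∀ i ∈ PySem.List.pyRange 2 17 1, 2 ≤ i ∧ i ≤ 16 := by
      intro i hi
      rw [PySem.List.mem_pyRange_one] at hi
      omega
    rw [outerA_eq n.toList hns hg _ hbases, buildRots_eq _ _ hns hg]
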